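-- pv_equiv track=rewrite | github.com/FarhanAliRaza/reflex | packages/reflex-base/src/reflex_base/compiler/astro_hosting.py | _normalize_route_pattern
-- ===== SOURCE A (Python) =====
-- def _normalize_route_pattern(route: str) -> str:
--     """Normalize a Reflex route into a host-redirect path pattern.
--
--     Args:
--         route: A Reflex route (e.g. ``"/blog/[slug]"`` or ``"/docs/[...path]"``).
--
--     Returns:
--         A pattern string suitable for inclusion in ``_redirects`` or a
--         Vercel rewrite rule. Catchalls become ``/*``; required dynamic
--         segments become ``:param``.
--     """
--     # Catchall (optional or required): collapse trailing ``[...x]`` /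
--     # ``[[...x]]`` segment to a host wildcard ``/*``. The optional form must
--     # be checked first because it shares a prefix with the required form.
--     catchall_prefix = None
--     if "[[..." in route:
--         catchall_prefix = route.split("[[...", 1)[0].rstrip("/")
--     elif "[..." in route:
--         catchall_prefix = route.split("[...", 1)[0].rstrip("/")
--     if catchall_prefix is not None:
--         return "/*" if not catchall_prefix else f"{catchall_prefix}/*"
--     # Required dynamic segment: /blog/[slug] -> /blog/:slug
--     out_parts: list[str] = []
--     for segment in route.split("/"):
--         if not segment:
--             out_parts.append("")
--             continue
--         if segment.startswith("[[") and segment.endswith("]]"):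
--             out_parts.append(f":{segment[2:-2]}?")
--             continue
--         if segment.startswith("[") and segment.endswith("]"):
--             out_parts.append(f":{segment[1:-1]}")
--             continue
--         out_parts.append(segment)
--     normalized = "/".join(out_parts)
--     if not normalized.startswith("/"):
--         normalized = "/" + normalized
--     return normalized
-- ===== SOURCE B (Python) =====
-- def _normalize_route_pattern(route: str) -> str:
--     cut = route.find("[[...")
--     if cut < 0:
--         cut = route.find("[...")
--     if cut >= 0:
--         return route[:cut].rstrip("/") + "/*"
--     # single character-level scan with a segment-start flag; emits directly
--     out = [] if route.startswith("/") else ["/"]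
--     at_start = True
--     i, n = 0, len(route)
--     while i < n:
--         c = route[i]
--         if c == "/":
--             out.append("/")
--             i += 1
--             at_start = True
--         elif c != "[" or not at_start:
--             out.append(c)
--             i += 1
--             at_start = False
--         else:
--             j = route.find("/", i)
--             if j < 0:
--                 j = n
--             seg = route[i:j]
--             if seg[:2] == "[[" and seg[-2:] == "]]":
--                 out.append(":" + seg[2:-2] + "?")
--             elif seg[-1] == "]":
--                 out.append(":" + seg[1:-1])
--             else:
--                 out.append(seg)
--             i = j
--             at_start = False
--     return "".join(out)
-- ===== Notes on version B (the rewrite author's own statement) =====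
-- stated objective: alternative
-- what changed: B replaces A's split-on-'/' / per-segment rewrite / rejoin pipeline by a single left-to-right character scan with a segment-start flag that emits the output directly (brackets are only rewritten when '[' opens a segment, found via one lookahead to the next '/'), and the catchall is located with str.find plus an index-decrementing strip instead of substring tests and split(sep,1); the leading slash is decided from the input route rather than from the joined output.
import Mathlib
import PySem

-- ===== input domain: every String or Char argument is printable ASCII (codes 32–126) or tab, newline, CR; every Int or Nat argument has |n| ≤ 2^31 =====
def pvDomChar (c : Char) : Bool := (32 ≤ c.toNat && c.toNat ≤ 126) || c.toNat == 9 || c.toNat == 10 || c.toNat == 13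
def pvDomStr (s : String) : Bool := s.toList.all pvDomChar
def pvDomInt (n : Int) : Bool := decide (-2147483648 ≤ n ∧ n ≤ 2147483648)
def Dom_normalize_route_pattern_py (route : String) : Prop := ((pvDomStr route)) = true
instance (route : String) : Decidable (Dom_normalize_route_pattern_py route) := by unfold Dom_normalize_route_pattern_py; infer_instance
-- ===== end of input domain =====

-- B replaces A's split-into-segments / rewrite / rejoin pipeline by a single left-to-right
-- character scan with a segment-start flag that emits the output directly; same O(n) cost.

-- hand port of Python's str.rstrip("/") (drop trailing '/' characters); exact: both Pythons call it
def pvRstripSlash (cs : List Char) : List Char := (cs.reverse.dropWhile (fun c => c == '/')).reverse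

-- ===== PORT A =====
def normalize_route_pattern_py (route : String) : String :=
  -- catchall_prefix = None; if "[[..." in route: … elif "[..." in route: …
  let catchall_prefix : Option (List Char) :=
    if PySem.Str.isIn "[[..." route then
      -- route.split("[[...", 1)[0].rstrip("/")
      some (pvRstripSlash ((((PySem.Str.splitMax? route "[[..." 1).getD []).headD "").toList))
    else if PySem.Str.isIn "[..." route then
      some (pvRstripSlash ((((PySem.Str.splitMax? route "[..." 1).getD []).headD "").toList))
    else none
  match catchall_prefix with
  | some p => if p.isEmpty then "/*" else String.ofList (p ++ ['/', '*'])
  | none =>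
    -- out_parts accumulator loop over route.split("/")
    let out_parts : List (List Char) :=
      ((PySem.Str.split? route "/").getD []).foldl (fun acc segS =>
        let seg := segS.toList
        if seg.isEmpty then acc ++ [[]]
        else if PySem.Chars.startswith seg ['[', '['] && PySem.Chars.endswith seg [']', ']'] then
          acc ++ [':' :: PySem.List.slice seg (some 2) (some (-2)) ++ ['?']]
        else if PySem.Chars.startswith seg ['['] && PySem.Chars.endswith seg [']'] then
          acc ++ [':' :: PySem.List.slice seg (some 1) (some (-1))]
        else acc ++ [seg]) []
    let normalized := PySem.Chars.join ['/'] out_parts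
    if PySem.Chars.startswith normalized ['/'] then String.ofList normalized
    else String.ofList ('/' :: normalized)

-- ===== PORT B =====
-- rewrite of one whole bracket segment, by slice comparison (Source B's seg[:2]/seg[-2:]/seg[-1] tests)
def rewriteSeg (seg : List Char) : List Char :=
  if PySem.List.slice seg none (some 2) = ['[', '['] ∧ PySem.List.slice seg (some (-2)) none = [']', ']'] then
    ':' :: PySem.List.slice seg (some 2) (some (-2)) ++ ['?']
  else if PySem.List.slice seg (some (-1)) none = [']'] then
    ':' :: PySem.List.slice seg (some 1) (some (-1))
  else seg

-- Source B's while-loop: one pass over the characters with the at_start flag, emitting directly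
def scanRewrite : List Char → Bool → List Char
  | [], _ => []
  | c :: rest, atStart =>
    if c = '/' then '/' :: scanRewrite rest true
    else if c ≠ '[' ∨ atStart = false then c :: scanRewrite rest false
    else rewriteSeg ((c :: rest).takeWhile (· ≠ '/')) ++
         scanRewrite ((c :: rest).dropWhile (· ≠ '/')) false
  termination_by l => l.length
  decreasing_by
  · simp
  · simp
  · simp only [List.dropWhile_cons]
    split
    · exact Nat.lt_succ_of_le (List.length_dropWhile_le _ _)
    · simp_all

def normalize_route_pattern_py_alt (route : String) : String :=
  let cut0 := PySem.Str.find route "[[..."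
  let cut := if cut0 < 0 then PySem.Str.find route "[..." else cut0
  if 0 ≤ cut then
    -- route[:cut].rstrip("/") + "/*"
    String.ofList (pvRstripSlash (PySem.List.slice route.toList none (some cut)) ++ ['/', '*'])
  else
    let lead : List Char := if PySem.Str.startswith route "/" then [] else ['/']
    String.ofList (lead ++ scanRewrite route.toList true)

-- ===== PRECONDITION & SPEC =====
def Spec_normalize_route_pattern_py (route : String) (out : String) : Prop := out = normalize_route_pattern_py_alt route
instance (route : String) (out : String) : Decidable (Spec_normalize_route_pattern_py route out) := by unfold Spec_normalize_route_pattern_py; infer_instance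

-- ===== CLAIM (what is proved, stated in full; the proofs are below) =====
def Claim_equal_normalize_route_pattern_py : Prop := ∀ (route : String), Dom_normalize_route_pattern_py route → Spec_normalize_route_pattern_py route (normalize_route_pattern_py route)

-- ===== LEMMAS AND PROOFS =====

-- A-side reference rewrite of one segment (the body of A's loop, as a function)
def convertSegment (seg : List Char) : List Char :=
  if PySem.Chars.startswith seg ['[', '['] && PySem.Chars.endswith seg [']', ']'] then
    ':' :: PySem.List.slice seg (some 2) (some (-2)) ++ ['?']
  else if PySem.Chars.startswith seg ['['] && PySem.Chars.endswith seg [']'] then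
    ':' :: PySem.List.slice seg (some 1) (some (-1))
  else seg

-- (first piece before the first occurrence of sep, and—if sep occurs—the remainder after it)
def firstSplit (sep : List Char) : List Char → List Char × Option (List Char)
  | [] => ([], none)
  | c :: rest =>
    if sep.isPrefixOf (c :: rest) then ([], some (List.drop sep.length (c :: rest)))
    else ((c :: (firstSplit sep rest).1), (firstSplit sep rest).2)

-- reference form of Python's full str.split(sep)
def mySplit (sep : List Char) : List Char → List (List Char)
  | [] => [[]]
  | c :: rest =>
    if sep.isPrefixOf (c :: rest) then [] :: mySplit sep (List.drop (max sep.length 1) (c :: rest))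
    else (mySplit sep rest).modifyHead (c :: ·)
  termination_by l => l.length
  decreasing_by
  · simp [List.length_drop]
  · simp

theorem firstSplit_prefix (sep : List Char) : ∀ (l : List Char), (firstSplit sep l).1 <+: l := by
  intro l
  induction l with
  | nil => simp [firstSplit]
  | cons c rest ih =>
    rw [firstSplit]
    split
    · simp
    · simpa using ih

theorem find_go_eq (sub : List Char) (hs : sub ≠ []) :
    ∀ (l : List Char) (k : Nat), PySem.Chars.find.go sub l k =
      if (firstSplit sub l).2.isSome then ((k : Int) + (firstSplit sub l).1.length) else -1 := by
  intro l
  induction l with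
  | nil =>
    intro k
    rw [PySem.Chars.find.go]
    simp [firstSplit, List.isEmpty_iff, hs]
  | cons c rest ih =>
    intro k
    rw [PySem.Chars.find.go, firstSplit]
    split
    · simp
    · rw [ih (k + 1)]
      split
      · simp
        ring
      · simp

theorem goMax0 (sep : List Char) (fuel : Nat) (l cur : List Char) (acc : List (List Char)) :
    PySem.Chars.splitOnMax.go sep fuel 0 l cur acc = acc.reverse ++ [cur.reverse ++ l] := by
  cases fuel with
  | zero => rw [PySem.Chars.splitOnMax.go]; simp
  | succ n =>
    cases l with
    | nil => simp [PySem.Chars.splitOnMax.go]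
    | cons c rest => rw [PySem.Chars.splitOnMax.go]; simp

theorem goMax1 (sep : List Char) :
    ∀ (fuel : Nat) (l cur : List Char) (acc : List (List Char)), l.length ≤ fuel →
      PySem.Chars.splitOnMax.go sep fuel 1 l cur acc =
        acc.reverse ++ (cur.reverse ++ (firstSplit sep l).1) :: (firstSplit sep l).2.toList := by
  intro fuel
  induction fuel with
  | zero =>
    intro l cur acc hl
    interval_cases hl' : l.length
    · rw [List.length_eq_zero_iff] at hl'
      subst hl'
      rw [PySem.Chars.splitOnMax.go]
      simp [firstSplit]
  | succ n ih =>
    intro l cur acc hl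
    cases l with
    | nil => simp [PySem.Chars.splitOnMax.go, firstSplit]
    | cons c rest =>
      rw [PySem.Chars.splitOnMax.go, if_neg (by norm_num), firstSplit]
      by_cases hpre : sep <+: (c :: rest)
      · simp [hpre, goMax0]
      · rw [if_neg (by simpa using hpre), if_neg (by simpa using hpre)]
        rw [ih rest (c :: cur) acc (by simp at hl; omega)]
        simp

theorem go_eq (sep : List Char) (hs : sep ≠ []) :
    ∀ (fuel : Nat) (l cur : List Char) (acc : List (List Char)), l.length ≤ fuel →
      PySem.Chars.splitOn.go sep fuel l cur acc =
        acc.reverse ++ (mySplit sep l).modifyHead (fun p => cur.reverse ++ p) := by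
  intro fuel
  induction fuel with
  | zero =>
    intro l cur acc hl
    interval_cases hl' : l.length
    · rw [List.length_eq_zero_iff] at hl'
      subst hl'
      simp [PySem.Chars.splitOn.go, mySplit]
  | succ n ih =>
    intro l cur acc hl
    cases l with
    | nil => simp [PySem.Chars.splitOn.go, mySplit]
    | cons c rest =>
      rw [mySplit]
      have hsep1 : 1 ≤ sep.length := List.length_pos_of_ne_nil hs
      have hmax : max sep.length 1 = sep.length := by omega
      simp only [PySem.Chars.splitOn.go]
      by_cases hpre : sep.isPrefixOf (c :: rest) = true
      · have hdrop : (List.drop sep.length (c :: rest)).length ≤ n := by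
          rw [List.length_drop]
          simp only [List.length_cons] at hl ⊢
          omega
        rw [if_pos hpre, if_pos hpre,
          ih (List.drop sep.length (c :: rest)) [] (cur.reverse :: acc) hdrop, hmax]
        simp
        exact congrFun List.modifyHead_id _
      · have hrest : rest.length ≤ n := by simp only [List.length_cons] at hl; omega
        rw [if_neg hpre, if_neg hpre, ih rest (c :: cur) acc hrest]
        simp [List.modifyHead_modifyHead, Function.comp_def]

-- bridges from the Str-level primitives the ports use
theorem splitMax1_head (s sep : String) (hs : sep.toList ≠ []) :
    (((PySem.Str.splitMax? s sep 1).getD []).headD "").toList = (firstSplit sep.toList s.toList).1 := by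
  simp only [PySem.Str.splitMax?, PySem.Chars.splitMax?, PySem.Chars.splitOnMax]
  rw [if_neg (by simp [List.isEmpty_iff, hs]), if_neg (by norm_num)]
  simp only [Int.toNat_one]
  rw [goMax1 sep.toList (s.toList.length + 1) s.toList [] [] (by omega)]
  simp

theorem find_eq' (s sub : String) (hs : sub.toList ≠ []) :
    PySem.Str.find s sub =
      if (firstSplit sub.toList s.toList).2.isSome
      then ((firstSplit sub.toList s.toList).1.length : Int) else -1 := by
  simp only [PySem.Str.find, PySem.Chars.find]
  rw [find_go_eq sub.toList hs s.toList 0]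
  simp

theorem isIn_eq' (sub s : String) (hs : sub.toList ≠ []) :
    PySem.Str.isIn sub s = (firstSplit sub.toList s.toList).2.isSome := by
  have h := find_eq' s sub hs
  simp only [PySem.Str.find] at h
  simp only [PySem.Str.isIn, PySem.Chars.isIn, h]
  cases hcase : (firstSplit sub.toList s.toList).2.isSome
  · simp
  · simp

theorem split_eq' (s : String) :
    ((PySem.Str.split? s "/").getD []).map String.toList = mySplit ['/'] s.toList := by
  simp only [PySem.Str.split?, PySem.Chars.split?, PySem.Chars.splitOn]
  rw [if_neg (by simp), show ("/" : String).toList = ['/'] from rfl]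
  rw [go_eq ['/'] (by simp) (s.toList.length + 1) s.toList [] [] (by omega)]
  simp [List.map_map, Function.comp_def]
  exact congrFun List.modifyHead_id _

theorem mySplit_ne_nil (sep : List Char) (l : List Char) : mySplit sep l ≠ [] := by
  fun_induction mySplit sep l with
  | case1 => simp
  | case2 c rest hpre ih => simp
  | case3 c rest hpre ih =>
    cases h : mySplit sep rest with
    | nil => exact absurd h ih
    | cons a t => simp

theorem conv_shape (c : Char) (p : List Char) :
    convertSegment (c :: p) = c :: p ∨ ∃ q, convertSegment (c :: p) = ':' :: q := by
  rw [convertSegment]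
  split
  · right; exact ⟨_, rfl⟩
  · split
    · right; exact ⟨_, rfl⟩
    · left; rfl

theorem conv_nil : convertSegment [] = [] := rfl

theorem conv_not_bracket (c : Char) (p : List Char) (hc : c ≠ '[') :
    convertSegment (c :: p) = c :: p := by
  have hsw1 : PySem.Chars.startswith (c :: p) ['['] = false := by
    rw [Bool.eq_false_iff]
    intro h
    rw [PySem.Chars.startswith_iff] at h
    obtain ⟨t, ht⟩ := h
    simp at ht
    exact hc ht.1.symm
  have hsw2 : PySem.Chars.startswith (c :: p) ['[', '['] = false := by
    rw [Bool.eq_false_iff]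
    intro h
    rw [PySem.Chars.startswith_iff] at h
    obtain ⟨t, ht⟩ := h
    simp at ht
    exact hc ht.1.symm
  rw [convertSegment, if_neg (by simp [hsw2]), if_neg (by simp [hsw1])]

-- B's slice tests agree with A's startswith/endswith tests on a segment that begins with '['
theorem rewriteSeg_eq_conv (p : List Char) :
    rewriteSeg ('[' :: p) = convertSegment ('[' :: p) := by
  have h1 : (PySem.List.slice ('[' :: p) none (some 2) = ['[', '['] ∧
      PySem.List.slice ('[' :: p) (some (-2)) none = [']', ']']) ↔
      (PySem.Chars.startswith ('[' :: p) ['[', '['] && PySem.Chars.endswith ('[' :: p) [']', ']']) = true := by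
    rw [Bool.and_eq_true, PySem.Chars.startswith_iff, PySem.Chars.endswith_iff,
      List.prefix_iff_eq_take, List.suffix_iff_eq_drop,
      PySem.List.slice_to _ (by norm_num), PySem.List.slice_from_neg_ofNat _ 2 (by norm_num)]
    exact ⟨fun ⟨a, b⟩ => ⟨a.symm, b.symm⟩, fun ⟨a, b⟩ => ⟨a.symm, b.symm⟩⟩
  have h3 : (PySem.List.slice ('[' :: p) (some (-1)) none = [']']) ↔
      (PySem.Chars.startswith ('[' :: p) ['['] && PySem.Chars.endswith ('[' :: p) [']']) = true := by
    rw [Bool.and_eq_true, PySem.Chars.startswith_iff, PySem.Chars.endswith_iff,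
      List.suffix_iff_eq_drop, PySem.List.slice_from_neg_one]
    constructor
    · intro h
      exact ⟨⟨p, rfl⟩, h.symm⟩
    · intro h
      exact h.2.symm
  rw [rewriteSeg, convertSegment]
  exact if_congr h1 rfl (if_congr h3 rfl rfl)

-- head of dropWhile (≠ '/') is '/' when nonempty
theorem dropWhile_head_slash : ∀ (l : List Char) (d : Char) (r : List Char),
    l.dropWhile (· ≠ '/') = d :: r → d = '/' := by
  intro l
  induction l with
  | nil => intro d r h; simp at h
  | cons c rest ih =>
    intro d r h
    rw [List.dropWhile_cons] at h
    split at h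
    · exact ih _ _ h
    · rename_i hp
      simp at hp
      cases h
      exact hp

-- the scan with the flag down copies the current segment verbatim
theorem scan_false (l : List Char) :
    scanRewrite l false = l.takeWhile (· ≠ '/') ++ scanRewrite (l.dropWhile (· ≠ '/')) true := by
  induction l with
  | nil => simp [scanRewrite]
  | cons c rest ih =>
    by_cases hc : c = '/'
    · subst hc
      rw [scanRewrite, if_pos rfl]
      simp [List.takeWhile, List.dropWhile, scanRewrite]
    · rw [scanRewrite, if_neg hc, if_pos (Or.inr rfl)]
      simp only [List.takeWhile_cons, List.dropWhile_cons, decide_eq_true_eq]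
      rw [if_pos hc, if_pos hc, ih]
      simp

theorem scan_restart (l : List Char) (h : l = [] ∨ ∃ r, l = '/' :: r) :
    scanRewrite l false = scanRewrite l true := by
  rcases h with h | ⟨r, h⟩ <;> subst h
  · simp [scanRewrite]
  · rw [scanRewrite, scanRewrite, if_pos rfl, if_pos rfl]

-- one step of the scan with the flag up: rewrite the whole first segment, continue after it
theorem scan_true (l : List Char) :
    scanRewrite l true = convertSegment (l.takeWhile (· ≠ '/')) ++ scanRewrite (l.dropWhile (· ≠ '/')) true := by
  cases l with
  | nil => simp [scanRewrite, conv_nil]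
  | cons c rest =>
    by_cases hc : c = '/'
    · subst hc
      simp only [List.takeWhile_cons, List.dropWhile_cons, decide_eq_true_eq]
      rw [if_neg (by simp), if_neg (by simp), conv_nil, List.nil_append]
    · by_cases hb : c = '['
      · subst hb
        rw [scanRewrite, if_neg hc, if_neg (by simp)]
        have htw : ('[' :: rest).takeWhile (· ≠ '/') = '[' :: rest.takeWhile (· ≠ '/') := by
          simp
        rw [htw, rewriteSeg_eq_conv, ← htw]
        congr 1
        exact scan_restart _ (by
          cases hd : ('[' :: rest).dropWhile (· ≠ '/') with
          | nil => exact Or.inl rfl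
          | cons d r =>
            refine Or.inr ⟨r, ?_⟩
            rw [dropWhile_head_slash _ _ _ hd])
      · rw [scanRewrite, if_neg hc, if_pos (Or.inl hb)]
        simp only [List.takeWhile_cons, List.dropWhile_cons, decide_eq_true_eq]
        rw [if_pos hc, if_pos hc, conv_not_bracket c _ hb, scan_false rest]
        simp

-- mySplit decomposes as head segment plus split of the remainder
theorem mySplit_decomp_nil : ∀ (l : List Char), l.dropWhile (· ≠ '/') = [] →
    mySplit ['/'] l = [l.takeWhile (· ≠ '/')] := by
  intro l
  induction l with
  | nil => intro h; simp [mySplit]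
  | cons c rest ih =>
    intro h
    rw [List.dropWhile_cons] at h
    by_cases hc : c = '/'
    · subst hc
      simp at h
    · rw [if_pos (by simp [hc])] at h
      rw [mySplit, if_neg (by simp [List.isPrefixOf]; exact fun hh => hc hh.symm), ih h]
      simp [hc]

theorem mySplit_decomp_cons : ∀ (l : List Char) (r : List Char), l.dropWhile (· ≠ '/') = '/' :: r →
    mySplit ['/'] l = l.takeWhile (· ≠ '/') :: mySplit ['/'] r := by
  intro l
  induction l with
  | nil => intro r h; simp at h
  | cons c rest ih =>
    intro r h
    rw [List.dropWhile_cons] at h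
    by_cases hc : c = '/'
    · subst hc
      rw [if_neg (by simp)] at h
      cases h
      rw [mySplit, if_pos (by simp [List.isPrefixOf])]
      simp
    · rw [if_pos (by simp [hc])] at h
      rw [mySplit, if_neg (by simp [List.isPrefixOf]; exact fun hh => hc hh.symm), ih r h]
      simp [hc]

-- join over a cons with nonempty tail
theorem join_cons (sep a : List Char) (x : List Char) (t : List (List Char)) :
    PySem.Chars.join sep (a :: x :: t) = a ++ sep ++ PySem.Chars.join sep (x :: t) := by
  simp [PySem.Chars.join, List.intercalate, List.intersperse]

-- the whole scan equals A's rewrite-each-segment-and-rejoin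
theorem scan_join_fuel : ∀ (n : Nat) (l : List Char), l.length ≤ n →
    scanRewrite l true = PySem.Chars.join ['/'] ((mySplit ['/'] l).map convertSegment) := by
  intro n
  induction n with
  | zero =>
    intro l hl
    have hnil : l = [] := List.length_eq_zero_iff.mp (by omega)
    subst hnil
    simp [scanRewrite, mySplit, PySem.Chars.join, List.intercalate, conv_nil]
  | succ n ih =>
    intro l hl
    rw [scan_true]
    cases hd : l.dropWhile (· ≠ '/') with
    | nil =>
      rw [mySplit_decomp_nil l hd]
      simp [PySem.Chars.join, List.intercalate, scanRewrite]
    | cons d r =>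
      have hdl : d = '/' := dropWhile_head_slash _ _ _ hd
      subst hdl
      have hr : r.length ≤ n := by
        have h1 : ('/' :: r).length ≤ l.length := by
          rw [← hd]; exact List.length_dropWhile_le _ _
        simp at h1
        omega
      obtain ⟨m0, t, hmt⟩ : ∃ m0 t, mySplit ['/'] r = m0 :: t := by
        cases h : mySplit ['/'] r with
        | nil => exact absurd h (mySplit_ne_nil _ _)
        | cons a t => exact ⟨a, t, rfl⟩
      rw [mySplit_decomp_cons l r hd, List.map_cons, hmt, List.map_cons, join_cons,
        scanRewrite, if_pos rfl, ih r hr, hmt, List.map_cons]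
      simp
theorem scan_join (l : List Char) :
    scanRewrite l true = PySem.Chars.join ['/'] ((mySplit ['/'] l).map convertSegment) :=
  scan_join_fuel l.length l (by omega)

theorem startswith_join_cons (d : Char) (q : List Char) (xs : List (List Char)) :
    PySem.Chars.startswith (PySem.Chars.join ['/'] ((d :: q) :: xs)) ['/'] = (d == '/') := by
  cases xs with
  | nil => simp [PySem.Chars.join, List.intercalate, PySem.Chars.startswith, List.isPrefixOf, BEq.comm]
  | cons y t => simp [PySem.Chars.join, List.intercalate, PySem.Chars.startswith, List.isPrefixOf, BEq.comm]

theorem startswith_join (l : List Char) :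
    PySem.Chars.startswith
      (PySem.Chars.join ['/'] ((mySplit ['/'] l).map convertSegment)) ['/'] =
    PySem.Chars.startswith l ['/'] := by
  cases l with
  | nil =>
    rw [mySplit]
    simp [PySem.Chars.join, List.intercalate, PySem.Chars.startswith, convertSegment,
      PySem.Chars.endswith, List.isPrefixOf, List.isSuffixOf]
  | cons c rest =>
    rw [mySplit]
    by_cases hc : c = '/'
    · subst hc
      rw [if_pos (by simp [List.isPrefixOf])]
      obtain ⟨m0, t, hmt⟩ : ∃ m0 t,
          mySplit ['/'] (List.drop (max (List.length ['/']) 1) ('/' :: rest)) = m0 :: t := by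
        cases h : mySplit ['/'] (List.drop (max (List.length ['/']) 1) ('/' :: rest)) with
        | nil => exact absurd h (mySplit_ne_nil _ _)
        | cons a t => exact ⟨a, t, rfl⟩
      rw [hmt]
      simp [PySem.Chars.join, List.intercalate, PySem.Chars.startswith, List.isPrefixOf, conv_nil]
    · have hc' : ¬('/' = c) := fun h => hc h.symm
      rw [if_neg (by simp [List.isPrefixOf, hc'])]
      obtain ⟨m0, t, hmt⟩ : ∃ m0 t, mySplit ['/'] rest = m0 :: t := by
        cases h : mySplit ['/'] rest with
        | nil => exact absurd h (mySplit_ne_nil _ _)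
        | cons a t => exact ⟨a, t, rfl⟩
      rw [hmt]
      simp only [List.modifyHead, List.map]
      rcases conv_shape c m0 with h | ⟨q, h⟩ <;> rw [h, startswith_join_cons] <;>
        simp [PySem.Chars.startswith, List.isPrefixOf, hc', hc]

-- ===== VERDICT (by name: the statement is the Claim_ definition above) =====
theorem normalize_route_pattern_py_spec : Claim_equal_normalize_route_pattern_py := by
  intro route _
  unfold Spec_normalize_route_pattern_py normalize_route_pattern_py normalize_route_pattern_py_alt
  have hs1 : ("[[..." : String).toList ≠ [] := by decide
  have hs2 : ("[..." : String).toList ≠ [] := by decide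
  rw [isIn_eq' "[[..." route hs1, isIn_eq' "[..." route hs2,
      find_eq' route "[[..." hs1, find_eq' route "[..." hs2]
  simp only []
  have hslice : ∀ (sepS : String), sepS.toList ≠ [] →
      PySem.List.slice route.toList none (some ((firstSplit sepS.toList route.toList).1.length : Int)) =
        (firstSplit sepS.toList route.toList).1 := by
    intro sepS hsep
    rw [PySem.List.slice_to route.toList (by omega)]
    have hp := firstSplit_prefix sepS.toList route.toList
    rw [List.prefix_iff_eq_take] at hp
    simp [← hp]
  by_cases h1 : (firstSplit ("[[..." : String).toList route.toList).2.isSome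
  · rw [if_pos h1, if_pos h1, splitMax1_head route "[[..." hs1]
    rw [if_neg (show ¬(((firstSplit ("[[..." : String).toList route.toList).1.length : Int) < 0) by omega),
        if_pos (show (0:Int) ≤ ((firstSplit ("[[..." : String).toList route.toList).1.length : Int) by omega)]
    rw [hslice "[[..." hs1]
    simp only []
    by_cases hE : (pvRstripSlash (firstSplit ("[[..." : String).toList route.toList).1).isEmpty
    · rw [if_pos hE]
      have hnil : pvRstripSlash (firstSplit ("[[..." : String).toList route.toList).1 = [] :=
        List.isEmpty_iff.mp hE
      rw [hnil, List.nil_append]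
    · rw [if_neg hE]
  · rw [if_neg h1, if_neg h1, if_pos (show (-1 : Int) < 0 by norm_num)]
    by_cases h2 : (firstSplit ("[..." : String).toList route.toList).2.isSome
    · rw [if_pos h2, if_pos h2, splitMax1_head route "[..." hs2]
      rw [if_pos (show (0:Int) ≤ ((firstSplit ("[..." : String).toList route.toList).1.length : Int) by omega)]
      rw [hslice "[..." hs2]
      simp only []
      by_cases hE : (pvRstripSlash (firstSplit ("[..." : String).toList route.toList).1).isEmpty
      · rw [if_pos hE]
        have hnil : pvRstripSlash (firstSplit ("[..." : String).toList route.toList).1 = [] :=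
          List.isEmpty_iff.mp hE
        rw [hnil, List.nil_append]
      · rw [if_neg hE]
    · rw [if_neg h2, if_neg h2, if_neg (show ¬((0:Int) ≤ -1) by norm_num)]
      simp only []
      rw [PySem.List.foldl_congr_mem _ _ (fun acc (sS : String) => acc ++ [convertSegment sS.toList]) _
        (by
          intro acc sS hmem
          beta_reduce
          by_cases he : sS.toList.isEmpty
          · rw [if_pos he, List.isEmpty_iff.mp he, conv_nil]
          · rw [if_neg he, convertSegment]
            split_ifs <;> rfl)]
      rw [PySem.List.foldl_append_singleton_eq_map, List.nil_append]
      rw [show (fun (sS : String) => convertSegment sS.toList) = convertSegment ∘ String.toList from rfl,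
          ← List.map_map, split_eq' route]
      rw [scan_join route.toList]
      rw [startswith_join route.toList]
      have hsw : PySem.Str.startswith route "/" = PySem.Chars.startswith route.toList ['/'] := rfl
      rw [hsw]
      by_cases hsl : PySem.Chars.startswith route.toList ['/'] = true
      · rw [if_pos hsl, if_pos hsl, List.nil_append]
      · rw [if_neg hsl, if_neg hsl]
        simp
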